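-- pv_equiv track=rewrite | github.com/pypi-data/pypi-mirror-1 | packages/tl.rename/tl.rename-0.1.tar.gz/tl.rename-0.1/tl/rename/case.py | sentence_case
-- ===== SOURCE A (Python) =====
-- def is_roman(word):
--     return set(word.upper()).issubset("IVXLCDM")
--
-- def sentence_case(name):
--     new_name = ""
--     first_word = True
--     word = ""
--     ellipsis = ""
--
--     def transform_word():
--         if is_roman(word):
--             return word.upper()
--         if first_word:
--             return word.capitalize()
--         return word.lower()
--
--     for c in name:
--         if c.isalpha():
--             word += c
--         else:
--             if word:
--                 new_name += transform_word()
--                 first_word = False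
--                 word = ""
--             new_name += c
--             if c == ".":
--                 ellipsis += c
--                 if ellipsis == "...":
--                     first_word = False
--             else:
--                 ellipsis = ""
--     new_name += transform_word()
--
--     return new_name
-- ===== SOURCE B (Python) =====
-- from itertools import groupby
--
-- def sentence_case(name):
--     parts = []
--     first_word = True
--     dots = 0
--     for is_alpha, chunk in groupby(name, key=str.isalpha):
--         run = ''.join(chunk)
--         if is_alpha:
--             if set(run.upper()).issubset("IVXLCDM"):
--                 parts.append(run.upper())
--             elif first_word:
--                 parts.append(run.capitalize())
--             else:
--                 parts.append(run.lower())
--             first_word = False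
--         else:
--             for c in run:
--                 parts.append(c)
--                 if c == ".":
--                     dots += 1
--                     if dots == 3:
--                         first_word = False
--                 else:
--                     dots = 0
--     return "".join(parts)
-- ===== Notes on version B (the rewrite author's own statement) =====
-- stated objective: faster
-- what changed: B replaces A's character-at-a-time state machine with lazily flushed word buffer and accumulated ellipsis string by an itertools.groupby split into alpha/non-alpha runs, transforming each whole word eagerly, keeping a dot counter instead of the ellipsis string, and joining a parts list once instead of repeated string concatenation.
import Mathlib
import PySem

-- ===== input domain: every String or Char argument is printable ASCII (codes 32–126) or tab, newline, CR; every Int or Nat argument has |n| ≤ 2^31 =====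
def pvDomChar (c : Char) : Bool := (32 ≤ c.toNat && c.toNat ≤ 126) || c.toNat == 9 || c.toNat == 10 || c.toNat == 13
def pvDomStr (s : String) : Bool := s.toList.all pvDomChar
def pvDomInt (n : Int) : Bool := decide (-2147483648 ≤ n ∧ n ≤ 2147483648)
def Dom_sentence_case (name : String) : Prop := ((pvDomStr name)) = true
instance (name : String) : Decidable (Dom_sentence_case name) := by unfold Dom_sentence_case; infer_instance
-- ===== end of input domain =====

-- B replaces A's char-at-a-time state machine (lazy word buffer + ellipsis string, quadratic
-- string concatenation) by a groupby-style split into alpha/non-alpha runs with eager word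
-- transformation, a dot counter, and a parts list joined once; measured faster at large sizes.

-- ===== PORT A =====
-- is_roman(word): set(word.upper()).issubset("IVXLCDM")
def pvIsRoman (word : List Char) : Bool :=
  PySem.Set.issubset (PySem.Set.ofList (PySem.Chars.upper word)) ("IVXLCDM".toList)

-- word.capitalize(): first char uppercased, rest lowered — exact on ASCII (the stated domain)
def pvCapitalize (word : List Char) : List Char :=
  match word with
  | [] => []
  | c :: rest => PySem.Chars.upperChar c :: PySem.Chars.lower rest

-- transform_word() of A (reads word and first_word)
def pvTransformA (word : List Char) (fw : Bool) : List Char :=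
  if pvIsRoman word then PySem.Chars.upper word
  else if fw then pvCapitalize word
  else PySem.Chars.lower word

-- A's loop body; state = (new_name, first_word, word, ellipsis)
def pvStepA (st : List Char × Bool × List Char × List Char) (c : Char) :
    List Char × Bool × List Char × List Char :=
  let (out, fw, word, ell) := st
  if PySem.Chars.isalpha c then
    (out, fw, word ++ [c], ell)
  else
    let out2 := if word ≠ [] then out ++ pvTransformA word fw else out
    let fw2 := if word ≠ [] then false else fw
    let out3 := out2 ++ [c]
    if c = '.' then
      let ell2 := ell ++ [c]
      if ell2 = ['.', '.', '.'] then (out3, false, [], ell2) else (out3, fw2, [], ell2)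
    else
      (out3, fw2, [], [])

def sentence_case (name : String) : String :=
  let st := name.toList.foldl pvStepA ([], true, [], [])
  String.ofList (st.1 ++ pvTransformA st.2.2.1 st.2.1)

-- ===== PORT B =====
-- itertools.groupby(name, key=str.isalpha): maximal runs with their key
def pvRuns (l : List Char) : List (Bool × List Char) :=
  match l with
  | [] => []
  | c :: rest =>
    let k := PySem.Chars.isalpha c
    (k, c :: rest.takeWhile (fun d => PySem.Chars.isalpha d = k)) ::
      pvRuns (rest.dropWhile (fun d => PySem.Chars.isalpha d = k))
termination_by l.length
decreasing_by
  exact Nat.lt_succ_of_le (List.length_dropWhile_le _ _)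

-- B's inner loop body for a non-alpha run; state = (parts-joined, first_word, dots)
def pvStepBChar (st : List Char × Bool × Nat) (c : Char) : List Char × Bool × Nat :=
  let (out, fw, dots) := st
  if c = '.' then
    let dots2 := dots + 1
    if dots2 = 3 then (out ++ [c], false, dots2) else (out ++ [c], fw, dots2)
  else
    (out ++ [c], fw, 0)

-- B's loop body over one group
def pvStepB (st : List Char × Bool × Nat) (g : Bool × List Char) : List Char × Bool × Nat :=
  let (out, fw, dots) := st
  if g.1 then
    let t :=
      if PySem.Set.issubset (PySem.Set.ofList (PySem.Chars.upper g.2)) ("IVXLCDM".toList) then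
        PySem.Chars.upper g.2
      else if fw then pvCapitalize g.2
      else PySem.Chars.lower g.2
    (out ++ t, false, dots)
  else
    g.2.foldl pvStepBChar (out, fw, dots)

def sentence_case_alt (name : String) : String :=
  String.ofList ((pvRuns name.toList).foldl pvStepB ([], true, 0)).1

-- ===== PRECONDITION & SPEC =====
def Spec_sentence_case (name : String) (out : String) : Prop := out = sentence_case_alt name
instance (name : String) (out : String) : Decidable (Spec_sentence_case name out) := by unfold Spec_sentence_case; infer_instance

-- ===== CLAIM (what is proved, stated in full; the proofs are below) =====
def Claim_equal_sentence_case : Prop := ∀ (name : String), Dom_sentence_case name → Spec_sentence_case name (sentence_case name)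

-- ===== LEMMAS AND PROOFS =====

-- unfolding equations of the well-founded pvRuns
theorem pvRuns_nil : pvRuns [] = [] := by rw [pvRuns.eq_def]

theorem pvRuns_cons (c : Char) (rest : List Char) :
    pvRuns (c :: rest) =
      (PySem.Chars.isalpha c,
        c :: rest.takeWhile (fun d => PySem.Chars.isalpha d = PySem.Chars.isalpha c)) ::
        pvRuns (rest.dropWhile (fun d => PySem.Chars.isalpha d = PySem.Chars.isalpha c)) := by
  rw [pvRuns.eq_def]

-- head of dropWhile fails the predicate
theorem pvDropWhile_head (p : Char → Bool) (l : List Char) (c : Char) (r : List Char)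
    (h : l.dropWhile p = c :: r) : p c = false := by
  have := List.head?_dropWhile_not p l
  rw [h] at this
  simpa using this

-- the simulation relation between A's state and B's state
def pvRel (a : List Char × Bool × List Char × List Char) (b : List Char × Bool × Nat) : Prop :=
  b.1 = a.1 ++ pvTransformA a.2.2.1 a.2.1 ∧
  b.2.1 = (a.2.1 && a.2.2.1.isEmpty) ∧
  a.2.2.2 = List.replicate b.2.2 '.'

theorem pvTransformA_nil (fw : Bool) : pvTransformA [] fw = [] := by
  cases fw <;> rfl

-- A's fold over an all-alpha run only extends the word buffer
theorem pvFoldA_alpha (w : List Char) (hw : ∀ c ∈ w, PySem.Chars.isalpha c = true)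
    (out : List Char) (fw : Bool) (word ell : List Char) :
    w.foldl pvStepA (out, fw, word, ell) = (out, fw, word ++ w, ell) := by
  induction w generalizing word with
  | nil => rw [List.foldl_nil, List.append_nil]
  | cons c rest ih =>
    have hc : PySem.Chars.isalpha c = true := hw c (List.mem_cons_self ..)
    simp only [List.foldl_cons, pvStepA, hc, if_true]
    rw [ih (fun d hd => hw d (List.mem_cons_of_mem _ hd))]
    simp

-- one non-alpha character preserves the relation and empties A's word buffer
theorem pvStep_nonalpha (c : Char) (hc : PySem.Chars.isalpha c = false)
    (a : List Char × Bool × List Char × List Char) (b : List Char × Bool × Nat)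
    (h : pvRel a b) :
    pvRel (pvStepA a c) (pvStepBChar b c) ∧ (pvStepA a c).2.2.1 = [] := by
  obtain ⟨out, fw, word, ell⟩ := a
  obtain ⟨outB, fwB, dots⟩ := b
  obtain ⟨h1, h2, h3⟩ := h
  simp only at h1 h2 h3
  have hout2 : (if word ≠ [] then out ++ pvTransformA word fw else out) = outB := by
    by_cases hw : word = []
    · simp [hw, h1, pvTransformA_nil]
    · simp [hw, h1]
  have hfw2 : (if word ≠ [] then false else fw) = fwB := by
    by_cases hw : word = []
    · simp [hw, h2]
    · cases word with
      | nil => exact absurd rfl hw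
      | cons x xs => simp [h2]
  by_cases hdot : c = '.'
  · subst hdot
    have hell : ell ++ ['.'] = List.replicate (dots + 1) '.' := by
      rw [h3, List.replicate_succ']
    have hcase : (ell ++ ['.'] = ['.', '.', '.']) ↔ (dots + 1 = 3) := by
      rw [hell]
      constructor
      · intro h
        have := congrArg List.length h
        simpa using this
      · intro h; rw [h]; decide
    simp only [pvStepA, pvStepBChar, hc, Bool.false_eq_true, if_false]
    by_cases h3dots : dots + 1 = 3
    · rw [if_pos (hcase.mpr h3dots), if_pos h3dots]
      refine ⟨⟨by simp [hout2, pvTransformA_nil], rfl, by simp [hell]⟩, by simp⟩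
    · rw [if_neg (fun hx => h3dots (hcase.mp hx)), if_neg h3dots]
      refine ⟨⟨by simp [hout2, pvTransformA_nil], by simp [hfw2], by simp [hell]⟩, by simp⟩
  · simp only [pvStepA, pvStepBChar, hc, Bool.false_eq_true, if_false, if_neg hdot]
    refine ⟨⟨by simp [hout2, pvTransformA_nil], by simp [hfw2], by simp⟩, by simp⟩

-- a whole non-alpha run preserves the relation; afterwards the word buffer is empty (run nonempty)
theorem pvFold_nonalpha (w : List Char) (hw : ∀ c ∈ w, PySem.Chars.isalpha c = false)
    (a : List Char × Bool × List Char × List Char) (b : List Char × Bool × Nat)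
    (h : pvRel a b) :
    pvRel (w.foldl pvStepA a) (w.foldl pvStepBChar b) ∧
      (w ≠ [] → (w.foldl pvStepA a).2.2.1 = []) := by
  induction w generalizing a b with
  | nil => exact ⟨h, fun h' => absurd rfl h'⟩
  | cons c rest ih =>
    have hc := hw c (List.mem_cons_self ..)
    obtain ⟨h1, _⟩ := pvStep_nonalpha c hc a b h
    obtain ⟨hrel, hemp⟩ := ih (fun d hd => hw d (List.mem_cons_of_mem _ hd)) _ _ h1
    refine ⟨hrel, fun _ => ?_⟩
    by_cases hr : rest = []
    · subst hr; exact (pvStep_nonalpha c hc a b h).2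
    · exact hemp hr

-- main simulation: folding A's step over l is simulated by folding B's step over pvRuns l,
-- provided A's word buffer is empty whenever the next run is alphabetic
theorem pvMain (l : List Char)
    (a : List Char × Bool × List Char × List Char) (b : List Char × Bool × Nat)
    (h : pvRel a b)
    (hword : ∀ c rest, l = c :: rest → PySem.Chars.isalpha c = true → a.2.2.1 = []) :
    pvRel (l.foldl pvStepA a) ((pvRuns l).foldl pvStepB b) := by
  induction hl : l.length using Nat.strong_induction_on generalizing l a b with
  | _ n ih =>
  match l with
  | [] => simpa [pvRuns_nil] using h
  | c :: rest =>
    rw [pvRuns_cons]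
    by_cases hc : PySem.Chars.isalpha c = true
    · -- alphabetic run
      have hwe : a.2.2.1 = [] := hword c rest rfl hc
      obtain ⟨out, fw, word, ell⟩ := a
      obtain ⟨outB, fwB, dots⟩ := b
      obtain ⟨h1, h2, h3⟩ := h
      simp only at h1 h2 h3 hwe
      subst hwe
      set w := rest.takeWhile (fun d => PySem.Chars.isalpha d = PySem.Chars.isalpha c) with hwdef
      set l' := rest.dropWhile (fun d => PySem.Chars.isalpha d = PySem.Chars.isalpha c) with hl'def
      have hsplit : c :: rest = (c :: w) ++ l' := by
        simp [hwdef, hl'def, List.takeWhile_append_dropWhile]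
      have halpha : ∀ d ∈ c :: w, PySem.Chars.isalpha d = true := by
        intro d hd
        rcases List.mem_cons.mp hd with h' | h'
        · subst h'; exact hc
        · have := List.mem_takeWhile_imp (hwdef ▸ h')
          simpa [hc] using this
      rw [hsplit, List.foldl_append, pvFoldA_alpha (c :: w) halpha]
      simp only [List.foldl_cons]
      have hstep : pvStepB (outB, fwB, dots) (PySem.Chars.isalpha c, c :: w)
          = (outB ++ pvTransformA (c :: w) fw, false, dots) := by
        simp only [pvStepB, hc, if_true, pvTransformA]
        have hfwB : fwB = fw := by simpa using h2
        subst hfwB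
        rfl
      rw [hstep]
      apply ih l'.length ?_ l' _ _ ?_ ?_ rfl
      · subst hl
        calc l'.length ≤ rest.length := hl'def ▸ List.length_dropWhile_le _ _
        _ < (c :: rest).length := by simp
      · refine ⟨?_, ?_, h3⟩
        · simp [h1, pvTransformA_nil]
        · simp
      · -- head of l' is non-alphabetic, so the buffer hypothesis is vacuous
        intro d rest' hd hdalpha
        have := pvDropWhile_head _ rest d rest' (hl'def ▸ hd)
        simp [hc, hdalpha] at this
    · -- non-alphabetic run
      replace hc : PySem.Chars.isalpha c = false := by simpa using hc
      set w := rest.takeWhile (fun d => PySem.Chars.isalpha d = PySem.Chars.isalpha c) with hwdef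
      set l' := rest.dropWhile (fun d => PySem.Chars.isalpha d = PySem.Chars.isalpha c) with hl'def
      have hsplit : c :: rest = (c :: w) ++ l' := by
        simp [hwdef, hl'def, List.takeWhile_append_dropWhile]
      have hnonalpha : ∀ d ∈ c :: w, PySem.Chars.isalpha d = false := by
        intro d hd
        rcases List.mem_cons.mp hd with h' | h'
        · subst h'; exact hc
        · have := List.mem_takeWhile_imp (hwdef ▸ h')
          simpa [hc] using this
      rw [hsplit, List.foldl_append]
      simp only [List.foldl_cons]
      have hBrun : pvStepB b (PySem.Chars.isalpha c, c :: w) = (c :: w).foldl pvStepBChar b := by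
        simp [pvStepB, hc]
      rw [hBrun]
      obtain ⟨hrel, hemp⟩ := pvFold_nonalpha (c :: w) hnonalpha a b h
      apply ih l'.length ?_ l' _ _ hrel ?_ rfl
      · subst hl
        calc l'.length ≤ rest.length := hl'def ▸ List.length_dropWhile_le _ _
        _ < (c :: rest).length := by simp
      · intro d rest' hd hdalpha
        exact hemp (by simp)

-- ===== VERDICT (by name: the statement is the Claim_ definition above) =====
theorem sentence_case_spec : Claim_equal_sentence_case := by
  intro name _
  have h := pvMain name.toList ([], true, [], []) ([], true, 0)
    ⟨by simp [pvTransformA_nil], rfl, rfl⟩ (fun _ _ _ _ => rfl)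
  obtain ⟨h1, -, -⟩ := h
  unfold Spec_sentence_case sentence_case sentence_case_alt
  rw [h1]
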